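-- pv_equiv track=rewrite | github.com/raiscui/G4Splat | scripts/generate_view_split.py | build_dense_view_indices
-- ===== SOURCE A (Python) =====
-- DEFAULT_DENSE_VIEW_GROUP_SIZE = 12
--
-- def parse_positive_int(value, flag_name):
--     try:
--         parsed = int(value)
--     except ValueError as exc:
--         raise ValueError(f"{flag_name} must be an integer.") from exc
--
--     if parsed <= 0:
--         raise ValueError(f"{flag_name} must be > 0.")
--
--     return parsed
--
-- def build_dense_view_indices(
--     image_count,
--     divisor,
--     offset=1,
--     group_size=DEFAULT_DENSE_VIEW_GROUP_SIZE,
-- ):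
--     if divisor is None:
--         return None
--
--     divisor = parse_positive_int(divisor, "--dense_view_divisor")
--     offset = parse_positive_int(offset, "--dense_view_offset") - 1
--     group_size = parse_positive_int(group_size, "--dense_view_group_size")
--     if offset >= divisor:
--         raise ValueError("--dense_view_offset must be in [1, --dense_view_divisor].")
--
--     dense_view_indices = []
--     grouped_stride = divisor * group_size
--     grouped_start = offset * group_size
--     for block_start in range(grouped_start, image_count, grouped_stride):
--         block_end = min(block_start + group_size, image_count)
--         dense_view_indices.extend(range(block_start, block_end))
--
--     if not dense_view_indices:
--         raise ValueError(
--             f"No dense-view indices generated for image_count={image_count}, "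
--             f"divisor={divisor}, offset={offset + 1}, group_size={group_size}."
--         )
--
--     return dense_view_indices
-- ===== SOURCE B (Python) =====
-- DEFAULT_DENSE_VIEW_GROUP_SIZE = 12
--
--
-- def parse_positive_int(value, flag_name):
--     try:
--         parsed = int(value)
--     except ValueError as exc:
--         raise ValueError(f"{flag_name} must be an integer.") from exc
--
--     if parsed <= 0:
--         raise ValueError(f"{flag_name} must be > 0.")
--
--     return parsed
--
--
-- def build_dense_view_indices(
--     image_count,
--     divisor,
--     offset=1,
--     group_size=DEFAULT_DENSE_VIEW_GROUP_SIZE,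
-- ):
--     if divisor is None:
--         return None
--
--     divisor = parse_positive_int(divisor, "--dense_view_divisor")
--     offset = parse_positive_int(offset, "--dense_view_offset") - 1
--     group_size = parse_positive_int(group_size, "--dense_view_group_size")
--     if offset >= divisor:
--         raise ValueError("--dense_view_offset must be in [1, --dense_view_divisor].")
--
--     # closed form: the k-th selected index is start + (k // group_size) * stride + k % group_size
--     stride = divisor * group_size
--     start = offset * group_size
--     full, rem = divmod(image_count - start, stride)
--     total = full * group_size + min(group_size, rem)
--     picks = [
--         start + (k // group_size) * stride + k % group_size for k in range(total)
--     ]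
--
--     if not picks:
--         raise ValueError(
--             f"No dense-view indices generated for image_count={image_count}, "
--             f"divisor={divisor}, offset={offset + 1}, group_size={group_size}."
--         )
--
--     return picks
-- ===== Notes on version B (the rewrite author's own statement) =====
-- stated objective: alternative
-- what changed: The block-strided loop that extends the result with one explicit sub-range per block is replaced by a closed form: one divmod gives the total count and the k-th selected index is emitted directly as start + (k // group_size) * stride + k % group_size.
import Mathlib
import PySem

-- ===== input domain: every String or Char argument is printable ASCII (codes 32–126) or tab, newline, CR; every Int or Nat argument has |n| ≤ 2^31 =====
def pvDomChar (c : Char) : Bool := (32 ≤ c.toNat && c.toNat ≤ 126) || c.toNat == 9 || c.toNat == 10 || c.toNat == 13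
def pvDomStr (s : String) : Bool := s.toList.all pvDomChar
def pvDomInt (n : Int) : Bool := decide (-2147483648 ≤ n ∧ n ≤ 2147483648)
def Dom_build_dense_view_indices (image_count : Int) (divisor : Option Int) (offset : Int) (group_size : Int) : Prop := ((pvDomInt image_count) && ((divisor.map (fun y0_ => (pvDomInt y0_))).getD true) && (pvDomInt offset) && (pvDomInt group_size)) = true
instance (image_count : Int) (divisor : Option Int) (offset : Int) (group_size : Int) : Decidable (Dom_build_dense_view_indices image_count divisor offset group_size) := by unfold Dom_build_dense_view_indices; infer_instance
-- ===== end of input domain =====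

-- B replaces A's block-strided loop (one explicit sub-range appended per block) by a closed form:
-- one divmod gives the total count and the k-th index is emitted directly from k.

-- ===== PORT A =====
-- ValueError paths of the Python are ported as `none`; Pre_ excludes them
def build_dense_view_indices (image_count : Int) (divisor : Option Int) (offset : Int) (group_size : Int) : Option (List Int) :=
  match divisor with
  | none => none
  | some d =>
    if d ≤ 0 then none               -- parse_positive_int("--dense_view_divisor") raises
    else if offset ≤ 0 then none     -- parse_positive_int("--dense_view_offset") raises
    else if group_size ≤ 0 then none -- parse_positive_int("--dense_view_group_size") raises
    else if offset - 1 ≥ d then none -- "--dense_view_offset must be in [1, --dense_view_divisor]."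
    else
      let r := (PySem.List.pyRange ((offset - 1) * group_size) image_count (d * group_size)).foldl
        (fun acc block_start =>
          acc ++ PySem.List.pyRange block_start (min (block_start + group_size) image_count)) []
      if r = [] then none            -- "No dense-view indices generated …" raises
      else some r

-- ===== PORT B =====
-- same raise paths ported as `none`; the body is the closed form of Source B
def build_dense_view_indices_alt (image_count : Int) (divisor : Option Int) (offset : Int) (group_size : Int) : Option (List Int) :=
  divisor.bind fun dv =>
    if 0 < dv ∧ 0 < offset ∧ 0 < group_size then
      if offset - 1 ≥ dv then none
      else
        let stride := dv * group_size
        let start := (offset - 1) * group_size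
        let full := PySem.Int.floordiv (image_count - start) stride   -- divmod: stride ≠ 0 here
        let rem := PySem.Int.mod (image_count - start) stride
        let picks := (PySem.List.pyRange 0 (full * group_size + min group_size rem)).map
          (fun k => start + PySem.Int.floordiv k group_size * stride + PySem.Int.mod k group_size)
        if picks.isEmpty then none
        else some picks
    else none

-- ===== PRECONDITION & SPEC =====
-- Pre_ excludes exactly the inputs on which the Python A raises ValueError: non-positive
-- divisor/offset/group_size, offset > divisor, or an empty result ((offset-1)*group_size ≥ image_count).
def Pre_build_dense_view_indices (image_count : Int) (divisor : Option Int) (offset : Int) (group_size : Int) : Prop :=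
  divisor = none ∨
    (0 < divisor.getD 0 ∧ 0 < offset ∧ 0 < group_size ∧ offset ≤ divisor.getD 0 ∧
      (offset - 1) * group_size < image_count)
instance (image_count : Int) (divisor : Option Int) (offset : Int) (group_size : Int) : Decidable (Pre_build_dense_view_indices image_count divisor offset group_size) := by unfold Pre_build_dense_view_indices; infer_instance

def pvWitness_build_dense_view_indices : Int × Option Int × Int × Int := (20, some 2, 1, 3)

def Spec_build_dense_view_indices (image_count : Int) (divisor : Option Int) (offset : Int) (group_size : Int) (out : Option (List Int)) : Prop := out = build_dense_view_indices_alt image_count divisor offset group_size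
instance (image_count : Int) (divisor : Option Int) (offset : Int) (group_size : Int) (out : Option (List Int)) : Decidable (Spec_build_dense_view_indices image_count divisor offset group_size out) := by unfold Spec_build_dense_view_indices; infer_instance

-- ===== CLAIM (what is proved, stated in full; the proofs are below) =====
def Claim_equal_build_dense_view_indices : Prop := ∀ (image_count : Int) (divisor : Option Int) (offset : Int) (group_size : Int), Dom_build_dense_view_indices image_count divisor offset group_size → Pre_build_dense_view_indices image_count divisor offset group_size → Spec_build_dense_view_indices image_count divisor offset group_size (build_dense_view_indices image_count divisor offset group_size)

-- ===== LEMMAS AND PROOFS =====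

-- pyRange with a positive step is empty when the interval is
lemma pyRange_nil_of_pos {a b s : Int} (hs : 0 < s) (h : b ≤ a) :
    PySem.List.pyRange a b s = [] := by
  rw [PySem.List.pyRange_of_pos _ _ hs, if_neg (by omega)]
  simp

-- cons-unfolding of pyRange for a general positive step
lemma pyRange_cons_of_pos {a b s : Int} (hs : 0 < s) (h : a < b) :
    PySem.List.pyRange a b s = a :: PySem.List.pyRange (a + s) b s := by
  rw [PySem.List.pyRange_of_pos _ _ hs, PySem.List.pyRange_of_pos _ _ hs]
  have hq0 : 0 ≤ (b - a - 1) / s := Int.ediv_nonneg (by omega) (by omega)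
  have hK : ((b - a + s - 1) / s).toNat = ((b - a - 1) / s).toNat + 1 := by
    have he : b - a + s - 1 = (b - a - 1) + 1 * s := by ring
    rw [he, Int.add_mul_ediv_right _ _ (by omega : s ≠ 0)]
    omega
  by_cases h2 : a + s < b
  · have hK' : ((b - (a + s) + s - 1) / s).toNat = ((b - a - 1) / s).toNat := by
      have he : b - (a + s) + s - 1 = b - a - 1 := by ring
      rw [he]
    rw [if_pos h, if_pos h2, hK, hK', List.range_succ_eq_map, List.map_cons, List.map_map]
    congr 1
    · simp
    · apply List.map_congr_left
      intro k _
      simp only [Function.comp_apply]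
      push_cast
      ring
  · have hq1 : (b - a - 1) / s = 0 := Int.ediv_eq_zero_of_lt (by omega) (by omega)
    rw [if_pos h, if_neg (by omega), hK, hq1]
    simp

-- shifting a unit range by a constant
lemma map_add_pyRange (a b c : Int) :
    (PySem.List.pyRange a b).map (fun k => k + c) = PySem.List.pyRange (a + c) (b + c) := by
  rw [PySem.List.pyRange_one a b, PySem.List.pyRange_one (a + c) (b + c), List.map_map]
  have he : b + c - (a + c) = b - a := by ring
  rw [he]
  apply List.map_congr_left
  intro k _
  simp only [Function.comp_apply]
  ring

-- B's closed form maps the k-range of block m onto the indices of block m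
lemma map_block (s t g : Int) (hg : 0 < g) (m w : Int) (_hw0 : 0 ≤ w) (hwg : w ≤ g) :
    (PySem.List.pyRange (m * g) (m * g + w)).map
        (fun k => s + PySem.Int.floordiv k g * t + PySem.Int.mod k g)
      = PySem.List.pyRange (s + m * t) (s + m * t + w) := by
  have hcong : ∀ k ∈ PySem.List.pyRange (m * g) (m * g + w),
      s + PySem.Int.floordiv k g * t + PySem.Int.mod k g = k + (s + m * t - m * g) := by
    intro k hk
    rw [PySem.List.mem_pyRange_one] at hk
    have hfd : PySem.Int.floordiv k g = m := by
      rw [PySem.Int.floordiv_eq_iff_of_pos hg]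
      refine ⟨by omega, ?_⟩
      have he : (m + 1) * g = m * g + g := by ring
      omega
    have hmod := PySem.Int.floordiv_mul_add_mod k g
    rw [hfd] at hmod ⊢
    omega
  rw [List.map_congr_left hcong, map_add_pyRange]
  congr 1 <;> ring

-- terminal case: past the last block both sides are empty
lemma alt_nil (s t g n q r : Int) (hg : 0 < g) (hgt : g ≤ t)
    (hq : q * t + r = n - s) (hr0 : 0 ≤ r)
    (m : Int) (hend : n ≤ s + m * t) :
    (PySem.List.pyRange (s + m * t) n t).flatMap
        (fun b => PySem.List.pyRange b (min (b + g) n))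
      = (PySem.List.pyRange (m * g) (q * g + min g r)).map
          (fun k => s + PySem.Int.floordiv k g * t + PySem.Int.mod k g) := by
  have ht : 0 < t := lt_of_lt_of_le hg hgt
  have hqm : q ≤ m := by
    by_contra hcon
    have h1 : (m + 1) * t ≤ q * t := mul_le_mul_of_nonneg_right (by omega) (by omega)
    have h2 : (m + 1) * t = m * t + t := by ring
    omega
  have hT : q * g + min g r ≤ m * g := by
    rcases eq_or_lt_of_le hqm with heq | hlt2
    · have e1 : q * g = m * g := by rw [heq]
      have e2 : q * t = m * t := by rw [heq]
      have h4 : min g r ≤ r := min_le_right _ _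
      omega
    · have h1 : (q + 1) * g ≤ m * g := mul_le_mul_of_nonneg_right (by omega) (by omega)
      have h2 : (q + 1) * g = q * g + g := by ring
      have h3 : min g r ≤ g := min_le_left _ _
      omega
  rw [pyRange_nil_of_pos ht hend, PySem.List.pyRange_one_eq_nil hT]
  simp

-- main invariant: from block m on, A's flatMap over the remaining strided block starts
-- equals B's closed-form map over the remaining k-range
lemma alt_blocks (s t g n q r : Int) (hg : 0 < g) (hgt : g ≤ t)
    (hq : q * t + r = n - s) (hr0 : 0 ≤ r) (hrt : r < t) :
    ∀ (K : Nat) (m : Int), 0 ≤ m → n - (s + m * t) ≤ K →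
    (PySem.List.pyRange (s + m * t) n t).flatMap
        (fun b => PySem.List.pyRange b (min (b + g) n))
      = (PySem.List.pyRange (m * g) (q * g + min g r)).map
          (fun k => s + PySem.Int.floordiv k g * t + PySem.Int.mod k g) := by
  intro K
  induction K with
  | zero =>
    intro m _ hK
    exact alt_nil s t g n q r hg hgt hq hr0 m (by push_cast at hK; omega)
  | succ K ih =>
    intro m hm hK
    have ht : 0 < t := lt_of_lt_of_le hg hgt
    by_cases hlt : s + m * t < n
    · have hmq : m ≤ q := by
        by_contra hcon
        have h1 : (q + 1) * t ≤ m * t := mul_le_mul_of_nonneg_right (by omega) (by omega)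
        have h2 : (q + 1) * t = q * t + t := by ring
        omega
      have hminr : 0 ≤ min g r := le_min (by omega) hr0
      have hmgq : m * g ≤ q * g := mul_le_mul_of_nonneg_right hmq (by omega)
      have h1e : m * g ≤ min ((m + 1) * g) (q * g + min g r) := by
        have h3 : (m + 1) * g = m * g + g := by ring
        omega
      rw [pyRange_cons_of_pos ht hlt, List.flatMap_cons,
          PySem.List.pyRange_one_append (m * g) (min ((m + 1) * g) (q * g + min g r))
            (q * g + min g r) h1e (min_le_right _ _),
          List.map_append]
      congr 1
      · -- the current block
        have hw : min ((m + 1) * g) (q * g + min g r) = m * g + min g (n - (s + m * t)) := by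
          rcases eq_or_lt_of_le hmq with heq | hlt2
          · have e1 : m * g = q * g := by rw [heq]
            have e2 : m * t = q * t := by rw [heq]
            have h3 : (m + 1) * g = m * g + g := by ring
            have h4 : min g r ≤ g := min_le_left _ _
            omega
          · have hge : g ≤ (q - m) * g := by
              have := mul_le_mul_of_nonneg_right (show (1:Int) ≤ q - m by omega)
                (show (0:Int) ≤ g by omega)
              simpa using this
            have hd1 : (q - m) * g = q * g - m * g := by ring
            have hte : t ≤ (q - m) * t := by
              have := mul_le_mul_of_nonneg_right (show (1:Int) ≤ q - m by omega)
                (show (0:Int) ≤ t by omega)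
              simpa using this
            have hd2 : (q - m) * t = q * t - m * t := by ring
            have h3 : (m + 1) * g = m * g + g := by ring
            omega
        have hmin2 : min (s + m * t + g) n = s + m * t + min g (n - (s + m * t)) := by omega
        rw [hw, hmin2]
        exact (map_block s t g hg m (min g (n - (s + m * t)))
          (le_min (by omega) (by omega)) (min_le_left _ _)).symm
      · -- the remaining blocks
        rcases eq_or_lt_of_le hmq with heq | hlt2
        · have e1 : m * g = q * g := by rw [heq]
          have e2 : m * t = q * t := by rw [heq]
          have he : min ((m + 1) * g) (q * g + min g r) = q * g + min g r := by
            have h3 : (m + 1) * g = m * g + g := by ring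
            have h4 : min g r ≤ g := min_le_left _ _
            omega
          rw [he, PySem.List.pyRange_one_eq_nil le_rfl,
              pyRange_nil_of_pos ht (by omega : n ≤ s + m * t + t)]
          simp
        · have he : min ((m + 1) * g) (q * g + min g r) = (m + 1) * g := by
            have hge : g ≤ (q - m) * g := by
              have := mul_le_mul_of_nonneg_right (show (1:Int) ≤ q - m by omega)
                (show (0:Int) ≤ g by omega)
              simpa using this
            have hd1 : (q - m) * g = q * g - m * g := by ring
            have h3 : (m + 1) * g = m * g + g := by ring
            omega
          have hstep : s + m * t + t = s + (m + 1) * t := by ring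
          rw [he, hstep]
          exact ih (m + 1) (by omega) (by
            have h4 : (m + 1) * t = m * t + t := by ring
            push_cast at hK ⊢
            omega)
    · exact alt_nil s t g n q r hg hgt hq hr0 m (by omega)

-- ===== VERDICT (by name: the statement is the Claim_ definition above) =====
theorem build_dense_view_indices_spec : Claim_equal_build_dense_view_indices := by
  unfold Claim_equal_build_dense_view_indices Spec_build_dense_view_indices
  intro n divisor offset gs _ hpre
  rcases divisor with _ | d
  · rfl
  · rcases hpre with h | ⟨hd, hoff, hg, hod, hne⟩
    · simp at h
    · simp only [Option.getD_some] at hd hod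
      simp only [build_dense_view_indices, build_dense_view_indices_alt, Option.bind_some,
        if_neg (by omega : ¬ d ≤ 0), if_neg (by omega : ¬ offset ≤ 0),
        if_neg (by omega : ¬ gs ≤ 0), if_neg (by omega : ¬ offset - 1 ≥ d),
        if_pos (show 0 < d ∧ 0 < offset ∧ 0 < gs from ⟨by omega, by omega, by omega⟩)]
      have ht : (0:Int) < d * gs := by positivity
      have hgt : gs ≤ d * gs := by nlinarith
      have hkey :
          (PySem.List.pyRange ((offset - 1) * gs) n (d * gs)).foldl
              (fun acc block_start =>
                acc ++ PySem.List.pyRange block_start (min (block_start + gs) n)) []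
            = (PySem.List.pyRange 0
                  (PySem.Int.floordiv (n - (offset - 1) * gs) (d * gs) * gs +
                    min gs (PySem.Int.mod (n - (offset - 1) * gs) (d * gs)))).map
                (fun k => (offset - 1) * gs + PySem.Int.floordiv k gs * (d * gs) +
                    PySem.Int.mod k gs) := by
        rw [PySem.List.foldl_append_eq_flatMap, List.nil_append]
        have h00 : (offset - 1) * gs + 0 * (d * gs) = (offset - 1) * gs := by ring
        have h01 : (0:Int) * gs = 0 := by ring
        have hmain := alt_blocks ((offset - 1) * gs) (d * gs) gs n
          (PySem.Int.floordiv (n - (offset - 1) * gs) (d * gs))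
          (PySem.Int.mod (n - (offset - 1) * gs) (d * gs)) hg hgt
          (PySem.Int.floordiv_mul_add_mod _ _) (PySem.Int.mod_nonneg _ ht)
          (PySem.Int.mod_lt _ ht)
          (n - (offset - 1) * gs).toNat 0 le_rfl (by rw [h00]; omega)
        rw [h00, h01] at hmain
        exact hmain
      rw [hkey]
      rcases hh : (PySem.List.pyRange 0
          (PySem.Int.floordiv (n - (offset - 1) * gs) (d * gs) * gs +
            min gs (PySem.Int.mod (n - (offset - 1) * gs) (d * gs)))).map
          (fun k => (offset - 1) * gs + PySem.Int.floordiv k gs * (d * gs) +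
              PySem.Int.mod k gs) with _ | ⟨y, ys⟩
      · simp
      · simp
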